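-- pv_equiv track=rewrite | github.com/bgzhao66/rime-flypy-tonal | tools/convert_to_flypy_tonal.py | sort_by_length_and_code
-- ===== SOURCE A (Python) =====
-- def sort_by_length_and_code(word_codes):
--     sorted_word_codes = dict()
--     for word in word_codes:
--         length = len(word)
--         if length not in sorted_word_codes:
--             sorted_word_codes[length] = dict()
--         for code, freq in word_codes[word]:
--             if code not in sorted_word_codes[length]:
--                 sorted_word_codes[length][code] = dict()
--             if word not in sorted_word_codes[length][code]:
--                 sorted_word_codes[length][code][word] = (0, 0)  # (frequency, placeholder for future use)
--             f, p = sorted_word_codes[length][code][word]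
--             sorted_word_codes[length][code][word] = (max(f, freq[0]), freq[1] if p == 0 else p)
--     return sorted_word_codes
-- ===== SOURCE B (Python) =====
-- def sort_by_length_and_code(word_codes):
--     # Pass 1: record the distinct word lengths in order, and flatten everything
--     # into one dict keyed by (length, code, word) -> ordered list of freq tuples.
--     lengths = {}
--     flat = {}
--     for word, codes in word_codes.items():
--         length = len(word)
--         lengths[length] = None
--         for code, freq in codes:
--             flat.setdefault((length, code, word), []).append(freq)
--     # Pass 2: reduce each freq list and build the nested structure fresh.
--     result = {}
--     for length in lengths:
--         result[length] = {}
--     for (length, code, word), freqs in flat.items():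
--         f = 0
--         for fr in freqs:
--             f = max(f, fr[0])
--         p = next((fr[1] for fr in freqs if fr[1] != 0), 0)
--         bucket = result[length]
--         inner = bucket.get(code, {})
--         inner[word] = (f, p)
--         bucket[code] = inner
--     return result
-- ===== Notes on version B (the rewrite author's own statement) =====
-- stated objective: alternative
-- what changed: A builds the nested length->code->word dict in one pass, mutating inner dicts and re-reducing the (f,p) value incrementally per freq tuple; B first flattens everything into one flat dict keyed by (length, code, word) holding the ordered freq list (plus an ordered set of lengths), then in a second pass reduces each freq list (f = running max floored at 0, p = first nonzero second component) and builds the nested structure fresh.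
import Mathlib
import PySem

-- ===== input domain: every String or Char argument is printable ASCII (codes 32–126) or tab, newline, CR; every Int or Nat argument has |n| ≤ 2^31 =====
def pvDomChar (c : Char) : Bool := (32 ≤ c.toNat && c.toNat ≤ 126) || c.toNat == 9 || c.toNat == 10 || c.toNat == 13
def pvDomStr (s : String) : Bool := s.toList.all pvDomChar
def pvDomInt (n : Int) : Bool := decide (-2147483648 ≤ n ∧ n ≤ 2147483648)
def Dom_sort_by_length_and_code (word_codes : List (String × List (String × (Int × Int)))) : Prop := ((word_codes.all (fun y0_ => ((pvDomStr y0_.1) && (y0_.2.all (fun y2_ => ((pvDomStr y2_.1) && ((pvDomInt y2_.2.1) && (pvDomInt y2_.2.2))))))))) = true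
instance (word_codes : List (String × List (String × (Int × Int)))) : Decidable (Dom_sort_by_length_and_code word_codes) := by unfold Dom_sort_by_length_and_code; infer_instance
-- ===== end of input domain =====

-- B replaces A's single nested-dict-mutation pass by a flatten-then-rebuild decomposition:
-- one flat dict keyed by (length, code, word) collecting freq lists, then a reduction pass
-- building the nested result fresh (alternative decomposition; equal return value).
-- The Python dict argument is ported as an association list; dict iteration is ported as
-- iteration over its (key, value) pairs (exact for a Python dict, whose keys are unique).

-- ===== PORT A =====
abbrev pvD3 : Type := PySem.Dict String (Int × Int)
abbrev pvD2 : Type := PySem.Dict String pvD3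
abbrev pvD1 : Type := PySem.Dict Int pvD2

-- shared output shaping: a nested Dict rendered as nested association lists (type convention)
def pvToItems (d : pvD1) : List (Int × List (String × List (String × Int × Int))) :=
  d.items.map (fun p => (p.1, p.2.items.map (fun q => (q.1, q.2.items))))

-- body of A's inner  'for code, freq in word_codes[word]'  loop (in-place nested-dict update)
def pvAinner (length : Int) (word : String) (d : pvD1) (cf : String × (Int × Int)) : pvD1 :=
  d.modify length PySem.Dict.empty (fun d2 =>
    let d2 := if d2.contains cf.1 then d2 else d2.insert cf.1 PySem.Dict.empty
    d2.modify cf.1 PySem.Dict.empty (fun d3 =>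
      let d3 := if d3.contains word then d3 else d3.insert word ((0 : Int), (0 : Int))
      let fp := d3.getD word (0, 0)
      d3.insert word (max fp.1 cf.2.1, if fp.2 == 0 then cf.2.2 else fp.2)))

-- body of A's outer  'for word in word_codes'  loop
def pvAword (d : pvD1) (wc : String × List (String × (Int × Int))) : pvD1 :=
  let length := PySem.Str.len wc.1
  let d := if d.contains length then d else d.insert length PySem.Dict.empty
  wc.2.foldl (pvAinner length wc.1) d

def sort_by_length_and_code (word_codes : List (String × List (String × (Int × Int)))) : List (Int × List (String × List (String × Int × Int))) :=
  pvToItems (word_codes.foldl pvAword PySem.Dict.empty)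

-- ===== PORT B =====
-- pass 1 inner step: flat.setdefault((length, code, word), []).append(freq)
def pvBflat (word : String) (length : Int) (fl : PySem.Dict (Int × String × String) (List (Int × Int))) (cf : String × (Int × Int)) : PySem.Dict (Int × String × String) (List (Int × Int)) :=
  fl.modify (length, cf.1, word) [] (fun xs => xs ++ [cf.2])

-- pass 1 word step: record the length, flatten the codes
def pvBpass1 (st : PySem.Set Int × PySem.Dict (Int × String × String) (List (Int × Int))) (wc : String × List (String × (Int × Int))) : PySem.Set Int × PySem.Dict (Int × String × String) (List (Int × Int)) :=
  let length := PySem.Str.len wc.1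
  (st.1.add length, wc.2.foldl (pvBflat wc.1 length) st.2)

-- pass 2 step: reduce one freq list and write it into the nested result
def pvBfill (d : pvD1) (tf : (Int × String × String) × List (Int × Int)) : pvD1 :=
  let f := tf.2.foldl (fun m fr => max m fr.1) 0
  let p := ((tf.2.find? (fun fr => fr.2 != 0)).map (fun fr => fr.2)).getD 0
  d.modify tf.1.1 PySem.Dict.empty (fun bucket =>
    bucket.modify tf.1.2.1 PySem.Dict.empty (fun inner => inner.insert tf.1.2.2 (f, p)))

def sort_by_length_and_code_alt (word_codes : List (String × List (String × (Int × Int)))) : List (Int × List (String × List (String × Int × Int))) :=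
  let st := word_codes.foldl pvBpass1 (PySem.Set.empty, PySem.Dict.empty)
  let result := st.1.foldl (fun d length => d.insert length (PySem.Dict.empty : pvD2)) PySem.Dict.empty
  pvToItems (st.2.items.foldl pvBfill result)

-- ===== PRECONDITION & SPEC =====
def Spec_sort_by_length_and_code (word_codes : List (String × List (String × (Int × Int)))) (out : List (Int × List (String × List (String × Int × Int)))) : Prop := out = sort_by_length_and_code_alt word_codes
instance (word_codes : List (String × List (String × (Int × Int)))) (out : List (Int × List (String × List (String × Int × Int)))) : Decidable (Spec_sort_by_length_and_code word_codes out) := by unfold Spec_sort_by_length_and_code; exact @instDecidableEqList _ (fun x y => instDecidableEqProd x y) _ _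

-- ===== CLAIM (what is proved, stated in full; the proofs are below) =====
def Claim_equal_sort_by_length_and_code : Prop := ∀ (word_codes : List (String × List (String × (Int × Int)))), Dom_sort_by_length_and_code word_codes → Spec_sort_by_length_and_code word_codes (sort_by_length_and_code word_codes)

-- ===== LEMMAS AND PROOFS =====

-- ---- proof-side abbreviations ----
def pvLen (wc : String × List (String × (Int × Int))) : Int := PySem.Str.len wc.1
def pvStream (words : List (String × List (String × (Int × Int)))) : List ((Int × String × String) × (Int × Int)) :=
  words.flatMap (fun wc => wc.2.map (fun cf => ((pvLen wc, cf.1, wc.1), cf.2)))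
def pvG1 (d : pvD1) (l : Int) : pvD2 := d.getD l PySem.Dict.empty
def pvG2 (d : pvD1) (l : Int) (c : String) : pvD3 := (pvG1 d l).getD c PySem.Dict.empty
def pvG3 (d : pvD1) (l : Int) (c : String) (w : String) : Int × Int := (pvG2 d l c).getD w (0, 0)
def pvUpd (v fr : Int × Int) : Int × Int := (max v.1 fr.1, if v.2 == 0 then fr.2 else v.2)
def pvRed (frs : List (Int × Int)) : Int × Int :=
  (frs.foldl (fun m fr => max m fr.1) 0, ((frs.find? (fun fr => fr.2 != 0)).map (fun fr => fr.2)).getD 0)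
-- A's and B's level-2/3 step functions, named for the proofs
def pvF3 (word : String) (cf : String × (Int × Int)) (d3 : pvD3) : pvD3 :=
  let d3' := if d3.contains word then d3 else d3.insert word ((0 : Int), (0 : Int))
  let fp := d3'.getD word (0, 0)
  d3'.insert word (max fp.1 cf.2.1, if fp.2 == 0 then cf.2.2 else fp.2)
def pvF2 (word : String) (cf : String × (Int × Int)) (d2 : pvD2) : pvD2 :=
  let d2' := if d2.contains cf.1 then d2 else d2.insert cf.1 PySem.Dict.empty
  d2'.modify cf.1 PySem.Dict.empty (pvF3 word cf)
def pvAD (words : List (String × List (String × (Int × Int)))) : pvD1 := words.foldl pvAword PySem.Dict.empty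
def pvFlat (words : List (String × List (String × (Int × Int)))) : PySem.Dict (Int × String × String) (List (Int × Int)) :=
  (pvStream words).foldl (fun fl x => fl.modify x.1 [] (fun xs => xs ++ [x.2])) PySem.Dict.empty
def pvTriples (words : List (String × List (String × (Int × Int)))) : List (Int × String × String) :=
  PySem.Set.ofList ((pvStream words).map (fun x => x.1))
def pvFreqs (words : List (String × List (String × (Int × Int)))) (t : Int × String × String) : List (Int × Int) :=
  ((pvStream words).filter (fun x => x.1 == t)).map (fun x => x.2)
def pvSeed (words : List (String × List (String × (Int × Int)))) : pvD1 :=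
  (PySem.Set.ofList (words.map pvLen)).foldl (fun d l => d.insert l (PySem.Dict.empty : pvD2)) PySem.Dict.empty
def pvBD (words : List (String × List (String × (Int × Int)))) : pvD1 :=
  (pvFlat words).items.foldl pvBfill (pvSeed words)

-- ---- generic Set utilities ----
theorem pv_set_add_of_mem {α : Type} [BEq α] [LawfulBEq α] {s : List α} {x : α} (h : x ∈ s) :
    PySem.Set.add s x = s := by
  simp [PySem.Set.add, List.contains_iff_mem, h]


theorem pv_set_update_of_subset {α : Type} [BEq α] [LawfulBEq α] (xs : List α) (s : List α)
    (h : ∀ x ∈ xs, x ∈ s) : PySem.Set.update s xs = s := by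
  induction xs generalizing s with
  | nil => rfl
  | cons x xs ih =>
    show PySem.Set.update (PySem.Set.add s x) xs = s
    rw [pv_set_add_of_mem (h x (List.mem_cons_self ..))]
    exact ih s (fun y hy => h y (List.mem_cons_of_mem _ hy))


theorem pv_ofList_snoc {α : Type} [BEq α] [LawfulBEq α] (xs : List α) (x : α) :
    PySem.Set.ofList (xs ++ [x]) = PySem.Set.add (PySem.Set.ofList xs) x := by
  simp [PySem.Set.ofList, List.foldl_append]


theorem pv_filter_add {α : Type} [BEq α] [LawfulBEq α] (p : α → Bool) (s : List α) (x : α) :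
    (PySem.Set.add s x).filter p = if p x then PySem.Set.add (s.filter p) x else s.filter p := by
  by_cases hm : x ∈ s
  · rw [pv_set_add_of_mem hm]
    by_cases hp : p x
    · rw [if_pos hp, pv_set_add_of_mem (List.mem_filter.mpr ⟨hm, hp⟩)]
    · simp [hp]
  · have hc : s.contains x = false := by
      simp [List.contains_iff_mem, hm]
    simp only [PySem.Set.add, hc, Bool.false_eq_true, if_false, List.filter_append]
    by_cases hp : p x
    · have hcf : (s.filter p).contains x = false := by
        simp [List.contains_iff_mem, List.mem_filter, hm]
      simp [hp, hcf, hm]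
    · simp [hp, hm]

theorem pv_filter_update {α : Type} [BEq α] [LawfulBEq α] (p : α → Bool) (xs : List α) (s : List α) :
    (PySem.Set.update s xs).filter p = PySem.Set.update (s.filter p) (xs.filter p) := by
  induction xs generalizing s with
  | nil => rfl
  | cons x xs ih =>
    show (PySem.Set.update (PySem.Set.add s x) xs).filter p = _
    rw [ih, pv_filter_add]
    by_cases hp : p x
    · simp [hp]
    · simp [hp]


theorem pv_filter_ofList {α : Type} [BEq α] [LawfulBEq α] (p : α → Bool) (xs : List α) :
    (PySem.Set.ofList xs).filter p = PySem.Set.ofList (xs.filter p) := by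
  simpa using pv_filter_update p xs []


theorem pv_map_update {α β : Type} [BEq α] [LawfulBEq α] [BEq β] [LawfulBEq β] (f : α → β)
    (xs : List α) (s : List α) :
    PySem.Set.ofList ((PySem.Set.update s xs).map f) = PySem.Set.update (PySem.Set.ofList (s.map f)) (xs.map f) := by
  induction xs generalizing s with
  | nil => rfl
  | cons x xs ih =>
    show PySem.Set.ofList ((PySem.Set.update (PySem.Set.add s x) xs).map f) = PySem.Set.update (PySem.Set.add (PySem.Set.ofList (s.map f)) (f x)) (xs.map f)
    by_cases hm : x ∈ s
    · rw [pv_set_add_of_mem hm, ih,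
        pv_set_add_of_mem ((PySem.Set.mem_ofList _ _).mpr (List.mem_map_of_mem hm))]
    · have hc : s.contains x = false := by simp [List.contains_iff_mem, hm]
      have : PySem.Set.add s x = s ++ [x] := by simp [PySem.Set.add, hm]
      rw [this, ih]
      congr 1
      rw [List.map_append, List.map_singleton, pv_ofList_snoc]


theorem pv_ofList_map {α β : Type} [BEq α] [LawfulBEq α] [BEq β] [LawfulBEq β] (f : α → β) (xs : List α) :
    PySem.Set.ofList ((PySem.Set.ofList xs).map f) = PySem.Set.ofList (xs.map f) := by
  simpa using pv_map_update f xs []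


theorem pv_filter_eq_singleton {α : Type} [BEq α] [LawfulBEq α] {l : List α} {t : α}
    (hn : l.Nodup) (ht : t ∈ l) : l.filter (fun x => x == t) = [t] := by
  induction l with
  | nil => cases ht
  | cons a l ih =>
    rcases List.nodup_cons.mp hn with ⟨ha, hn'⟩
    rcases List.mem_cons.mp ht with h | h
    · have htl : t ∉ l := h ▸ ha
      have : l.filter (fun x => x == t) = [] := by
        rw [List.filter_eq_nil_iff]
        intro x hx
        simp only [beq_iff_eq]
        rintro rfl; exact htl hx
      subst h
      simp [this]
    · have hne : (a == t) = false := by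
        simp only [beq_eq_false_iff_ne]
        rintro rfl; exact ha h
      simp [hne, ih hn' h]


-- ---- generic Dict utilities ----
theorem pv_keys_insert_add {κ ν : Type} [BEq κ] [LawfulBEq κ] [DecidableEq κ] (d : PySem.Dict κ ν) (k : κ) (v : ν) :
    (d.insert k v).keys = PySem.Set.add d.keys k := by
  by_cases hc : d.contains k
  · rw [PySem.Dict.keys_insert_of_contains d v hc]
    have : k ∈ d.keys := by
      have := (PySem.Dict.contains_eq_decide_mem_keys d k) ▸ hc
      simpa using this
    rw [pv_set_add_of_mem this]
  · have hc' : d.contains k = false := by simpa using hc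
    rw [PySem.Dict.keys_insert_of_not_contains d v hc']
    have hk : k ∉ d.keys := by
      rw [PySem.Dict.contains_eq_decide_mem_keys] at hc'
      simpa using hc'
    simp [PySem.Set.add, hk]


theorem pv_keys_modify_add {κ ν : Type} [BEq κ] [LawfulBEq κ] [DecidableEq κ] (d : PySem.Dict κ ν) (k : κ) (d0 : ν) (f : ν → ν) :
    (d.modify k d0 f).keys = PySem.Set.add d.keys k := by
  show (d.insert k (f (d.getD k d0))).keys = _
  exact pv_keys_insert_add d k _



-- ---- value-reduction lemmas ----
theorem pv_foldl_upd_fst (frs : List (Int × Int)) (a b : Int) :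
    (frs.foldl pvUpd (a, b)).1 = frs.foldl (fun m fr => max m fr.1) a := by
  induction frs generalizing a b with
  | nil => rfl
  | cons fr frs ih => simpa [pvUpd] using ih (max a fr.1) _


theorem pv_foldl_upd_snd (frs : List (Int × Int)) (a b : Int) :
    (frs.foldl pvUpd (a, b)).2 =
      if b = 0 then ((frs.find? (fun fr => fr.2 != 0)).map (fun fr => fr.2)).getD 0 else b := by
  induction frs generalizing a b with
  | nil => by_cases hb : b = 0 <;> simp [hb]
  | cons fr frs ih =>
    simp only [List.foldl_cons]
    by_cases hb : b = 0
    · by_cases h2 : fr.2 = 0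
      · simp [pvUpd, hb, h2, ih]
      · simp [pvUpd, hb, h2, ih]
    · simp [pvUpd, hb, ih]


theorem pv_red_eq (frs : List (Int × Int)) : pvRed frs = frs.foldl pvUpd (0, 0) := by
  have h1 := pv_foldl_upd_fst frs 0 0
  have h2 := pv_foldl_upd_snd frs 0 0
  norm_num at h2
  unfold pvRed
  rw [← h1, ← h2]



theorem pv_update_append {α : Type} [BEq α] (s : List α) (as bs : List α) :
    PySem.Set.update s (as ++ bs) = PySem.Set.update (PySem.Set.update s as) bs := by
  simp [PySem.Set.update, List.foldl_append]

theorem pv_ens_keys (d : pvD1) (l : Int) :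
    (if d.contains l then d else d.insert l PySem.Dict.empty).keys = PySem.Set.add d.keys l := by
  by_cases hc : d.contains l
  · have hm : l ∈ d.keys := by
      rw [PySem.Dict.contains_eq_decide_mem_keys] at hc
      simpa using hc
    rw [if_pos hc, pv_set_add_of_mem hm]
  · rw [if_neg hc, pv_keys_insert_add]

theorem pv_ens_g1 (d : pvD1) (l' l : Int) :
    pvG1 (if d.contains l' then d else d.insert l' PySem.Dict.empty) l = pvG1 d l := by
  by_cases hc : d.contains l'
  · rw [if_pos hc]
  · rw [if_neg hc]
    by_cases hl : l = l'
    · subst hl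
      unfold pvG1
      rw [PySem.Dict.getD_insert_self, PySem.Dict.getD_of_not_contains _ _ (by simpa using hc)]
    · unfold pvG1
      rw [PySem.Dict.getD_insert_of_ne _ _ _ hl]



-- ---- A side: single-step facts ----
theorem pv_f3_keys (w0 : String) (cf : String × (Int × Int)) (d3 : pvD3) :
    (pvF3 w0 cf d3).keys = PySem.Set.add d3.keys w0 := by
  unfold pvF3
  by_cases hc : d3.contains w0
  · simp only [hc, if_true]
    exact pv_keys_insert_add d3 w0 _
  · simp only [hc, if_false, Bool.false_eq_true]
    rw [pv_keys_insert_add, pv_keys_insert_add]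
    exact pv_set_add_of_mem ((PySem.Set.mem_add _ _ _).mpr (Or.inr rfl))

theorem pv_f3_getD_ne (w0 : String) (cf : String × (Int × Int)) (d3 : pvD3) {w : String} (h : w ≠ w0) :
    (pvF3 w0 cf d3).getD w (0, 0) = d3.getD w (0, 0) := by
  unfold pvF3
  by_cases hc : d3.contains w0
  · simp only [hc, if_true]
    rw [PySem.Dict.getD_insert_of_ne _ _ _ h]
  · simp only [hc, if_false, Bool.false_eq_true]
    rw [PySem.Dict.getD_insert_of_ne _ _ _ h, PySem.Dict.getD_insert_of_ne _ _ _ h]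

theorem pv_f3_getD_eq (w0 : String) (cf : String × (Int × Int)) (d3 : pvD3) :
    (pvF3 w0 cf d3).getD w0 (0, 0) = pvUpd (d3.getD w0 (0, 0)) cf.2 := by
  unfold pvF3 pvUpd
  by_cases hc : d3.contains w0
  · simp only [hc, if_true, PySem.Dict.getD_insert_self]
  · simp only [hc, if_false, Bool.false_eq_true]
    rw [PySem.Dict.getD_insert_self, PySem.Dict.getD_insert_self,
      PySem.Dict.getD_of_not_contains _ _ (by simpa using hc)]

theorem pv_f2_keys (w0 : String) (cf : String × (Int × Int)) (d2 : pvD2) :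
    (pvF2 w0 cf d2).keys = PySem.Set.add d2.keys cf.1 := by
  unfold pvF2
  by_cases hc : d2.contains cf.1
  · simp only [hc, if_true]
    rw [pv_keys_modify_add]
  · simp only [hc, if_false, Bool.false_eq_true]
    rw [pv_keys_modify_add, pv_keys_insert_add]
    exact pv_set_add_of_mem ((PySem.Set.mem_add _ _ _).mpr (Or.inr rfl))

theorem pv_f2_getD_ne (w0 : String) (cf : String × (Int × Int)) (d2 : pvD2) {c : String} (h : c ≠ cf.1) :
    (pvF2 w0 cf d2).getD c PySem.Dict.empty = d2.getD c PySem.Dict.empty := by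
  unfold pvF2
  by_cases hc : d2.contains cf.1
  · simp only [hc, if_true]
    rw [PySem.Dict.getD_modify_of_ne _ _ _ h]
  · simp only [hc, if_false, Bool.false_eq_true]
    rw [PySem.Dict.getD_modify_of_ne _ _ _ h, PySem.Dict.getD_insert_of_ne _ _ _ h]

theorem pv_f2_getD_eq (w0 : String) (cf : String × (Int × Int)) (d2 : pvD2) :
    (pvF2 w0 cf d2).getD cf.1 PySem.Dict.empty = pvF3 w0 cf (d2.getD cf.1 PySem.Dict.empty) := by
  unfold pvF2
  by_cases hc : d2.contains cf.1
  · simp only [hc, if_true, PySem.Dict.getD_modify_self]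
  · simp only [hc, if_false, Bool.false_eq_true]
    rw [PySem.Dict.getD_modify_self, PySem.Dict.getD_insert_self,
      PySem.Dict.getD_of_not_contains _ _ (by simpa using hc)]

theorem pv_ainner_eq_modify (l0 : Int) (w0 : String) (d : pvD1) (cf : String × (Int × Int)) :
    pvAinner l0 w0 d cf = d.modify l0 PySem.Dict.empty (pvF2 w0 cf) := by
  unfold pvAinner pvF2 pvF3
  rfl

theorem pv_acs_keys (l0 : Int) (w0 : String) (cs : List (String × (Int × Int))) (d : pvD1) :
    (cs.foldl (pvAinner l0 w0) d).keys = PySem.Set.update d.keys (cs.map (fun _ => l0)) := by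
  induction cs generalizing d with
  | nil => rfl
  | cons cf cs ih =>
    simp only [List.foldl_cons, List.map_cons]
    rw [ih, pv_ainner_eq_modify, pv_keys_modify_add]
    rfl

theorem pv_acs_g1_ne (l0 : Int) (w0 : String) (cs : List (String × (Int × Int))) (d : pvD1) {l : Int} (h : l ≠ l0) :
    pvG1 (cs.foldl (pvAinner l0 w0) d) l = pvG1 d l := by
  induction cs generalizing d with
  | nil => rfl
  | cons cf cs ih =>
    simp only [List.foldl_cons]
    rw [ih]
    unfold pvG1
    rw [pv_ainner_eq_modify, PySem.Dict.getD_modify_of_ne _ _ _ h]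

theorem pv_acs_g1_eq (l0 : Int) (w0 : String) (cs : List (String × (Int × Int))) (d : pvD1) :
    pvG1 (cs.foldl (pvAinner l0 w0) d) l0 = cs.foldl (fun d2 cf => pvF2 w0 cf d2) (pvG1 d l0) := by
  induction cs generalizing d with
  | nil => rfl
  | cons cf cs ih =>
    simp only [List.foldl_cons]
    rw [ih]
    congr 1
    unfold pvG1
    rw [pv_ainner_eq_modify, PySem.Dict.getD_modify_self]

-- ---- A side: level-3 fold over codes sharing one code key ----
theorem pv_f3s_keys (w0 : String) (cs : List (String × (Int × Int))) (d3 : pvD3) :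
    (cs.foldl (fun d3 cf => pvF3 w0 cf d3) d3).keys = PySem.Set.update d3.keys (cs.map (fun _ => w0)) := by
  induction cs generalizing d3 with
  | nil => rfl
  | cons cf cs ih =>
    simp only [List.foldl_cons, List.map_cons]
    rw [ih, pv_f3_keys]
    rfl

theorem pv_f3s_val_ne (w0 : String) (cs : List (String × (Int × Int))) (d3 : pvD3) {w : String} (h : w ≠ w0) :
    (cs.foldl (fun d3 cf => pvF3 w0 cf d3) d3).getD w (0, 0) = d3.getD w (0, 0) := by
  induction cs generalizing d3 with
  | nil => rfl
  | cons cf cs ih =>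
    simp only [List.foldl_cons]
    rw [ih, pv_f3_getD_ne _ _ _ h]

theorem pv_f3s_val_eq (w0 : String) (cs : List (String × (Int × Int))) (d3 : pvD3) :
    (cs.foldl (fun d3 cf => pvF3 w0 cf d3) d3).getD w0 (0, 0) =
      (cs.map (fun cf => cf.2)).foldl pvUpd (d3.getD w0 (0, 0)) := by
  induction cs generalizing d3 with
  | nil => rfl
  | cons cf cs ih =>
    simp only [List.foldl_cons, List.map_cons]
    rw [ih, pv_f3_getD_eq]

-- ---- A side: level-2 fold over codes of one word ----
theorem pv_f2s_keys (w0 : String) (cs : List (String × (Int × Int))) (d2 : pvD2) :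
    (cs.foldl (fun d2 cf => pvF2 w0 cf d2) d2).keys = PySem.Set.update d2.keys (cs.map (fun cf => cf.1)) := by
  induction cs generalizing d2 with
  | nil => rfl
  | cons cf cs ih =>
    simp only [List.foldl_cons, List.map_cons]
    rw [ih, pv_f2_keys]
    rfl

theorem pv_f2s_getD (w0 : String) (cs : List (String × (Int × Int))) (d2 : pvD2) (c : String) :
    (cs.foldl (fun d2 cf => pvF2 w0 cf d2) d2).getD c PySem.Dict.empty =
      (cs.filter (fun cf => cf.1 == c)).foldl (fun d3 cf => pvF3 w0 cf d3) (d2.getD c PySem.Dict.empty) := by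
  induction cs generalizing d2 with
  | nil => rfl
  | cons cf cs ih =>
    simp only [List.foldl_cons]
    by_cases h : cf.1 = c
    · subst h
      have ht : (cf.1 == cf.1) = true := by simp
      simp only [List.filter_cons, ht, if_true, List.foldl_cons]
      rw [ih, pv_f2_getD_eq]
    · have hf : (cf.1 == c) = false := by simpa using h
      simp only [List.filter_cons, hf, Bool.false_eq_true, if_false]
      rw [ih, pv_f2_getD_ne _ _ _ (Ne.symm h)]

-- ---- A side: one word step ----
theorem pv_aw_keys (d : pvD1) (wc : String × List (String × (Int × Int))) :
    (pvAword d wc).keys = PySem.Set.add d.keys (pvLen wc) := by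
  show ((wc.2.foldl (pvAinner (PySem.Str.len wc.1) wc.1)
      (if d.contains (PySem.Str.len wc.1) then d else d.insert (PySem.Str.len wc.1) PySem.Dict.empty))).keys = _
  rw [pv_acs_keys, pv_ens_keys]
  exact pv_set_update_of_subset _ _ (by
    intro x hx
    rcases List.mem_map.mp hx with ⟨cf, _, rfl⟩
    exact (PySem.Set.mem_add _ _ _).mpr (Or.inr rfl))

theorem pv_aw_g1_ne (d : pvD1) (wc : String × List (String × (Int × Int))) {l : Int} (h : l ≠ pvLen wc) :
    pvG1 (pvAword d wc) l = pvG1 d l := by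
  unfold pvLen at h
  show pvG1 ((wc.2.foldl (pvAinner (PySem.Str.len wc.1) wc.1)
      (if d.contains (PySem.Str.len wc.1) then d else d.insert (PySem.Str.len wc.1) PySem.Dict.empty))) l = _
  rw [pv_acs_g1_ne _ _ _ _ h, pv_ens_g1]

theorem pv_aw_g1_eq (d : pvD1) (wc : String × List (String × (Int × Int))) :
    pvG1 (pvAword d wc) (pvLen wc) = wc.2.foldl (fun d2 cf => pvF2 wc.1 cf d2) (pvG1 d (pvLen wc)) := by
  unfold pvLen
  show pvG1 ((wc.2.foldl (pvAinner (PySem.Str.len wc.1) wc.1)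
      (if d.contains (PySem.Str.len wc.1) then d else d.insert (PySem.Str.len wc.1) PySem.Dict.empty))) (PySem.Str.len wc.1) = _
  rw [pv_acs_g1_eq, pv_ens_g1]

-- ---- A side: characterizations of the whole loop ----
theorem pv_A_keys (words : List (String × List (String × (Int × Int)))) (d : pvD1) :
    (words.foldl pvAword d).keys = PySem.Set.update d.keys (words.map pvLen) := by
  induction words generalizing d with
  | nil => rfl
  | cons wc rest ih =>
    simp only [List.foldl_cons, List.map_cons]
    rw [ih, pv_aw_keys]
    rfl

theorem pv_stream_cons (wc : String × List (String × (Int × Int))) (rest : List (String × List (String × (Int × Int)))) :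
    pvStream (wc :: rest) = (wc.2.map (fun cf => ((pvLen wc, cf.1, wc.1), cf.2))) ++ pvStream rest := by
  simp [pvStream]

theorem pv_A_g2keys (words : List (String × List (String × (Int × Int)))) (d : pvD1) (l : Int) :
    (pvG1 (words.foldl pvAword d) l).keys =
      PySem.Set.update (pvG1 d l).keys
        (((pvStream words).filter (fun x => x.1.1 == l)).map (fun x => x.1.2.1)) := by
  induction words generalizing d with
  | nil => rfl
  | cons wc rest ih =>
    simp only [List.foldl_cons]
    rw [ih, pv_stream_cons, List.filter_append, List.map_append, pv_update_append]
    congr 1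
    by_cases h : pvLen wc = l
    · subst h
      rw [pv_aw_g1_eq, pv_f2s_keys]
      congr 1
      rw [List.filter_map]
      simp [Function.comp_def]
    · rw [pv_aw_g1_ne d wc (fun hh => h hh.symm)]
      have hnil : (wc.2.map (fun cf => ((pvLen wc, cf.1, wc.1), cf.2))).filter (fun x => x.1.1 == l) = [] := by
        rw [List.filter_eq_nil_iff]
        intro x hx
        rcases List.mem_map.mp hx with ⟨cf, _, rfl⟩
        simpa using h
      rw [hnil]
      rfl

theorem pv_A_g3keys (words : List (String × List (String × (Int × Int)))) (d : pvD1) (l : Int) (c : String) :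
    (pvG2 (words.foldl pvAword d) l c).keys =
      PySem.Set.update (pvG2 d l c).keys
        (((pvStream words).filter (fun x => x.1.1 == l && x.1.2.1 == c)).map (fun x => x.1.2.2)) := by
  induction words generalizing d with
  | nil => rfl
  | cons wc rest ih =>
    simp only [List.foldl_cons]
    rw [ih, pv_stream_cons, List.filter_append, List.map_append, pv_update_append]
    congr 1
    by_cases h : pvLen wc = l
    · subst h
      unfold pvG2
      rw [pv_aw_g1_eq, pv_f2s_getD, pv_f3s_keys]
      congr 1
      rw [List.filter_map]
      simp [Function.comp_def]
    · unfold pvG2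
      rw [pv_aw_g1_ne d wc (fun hh => h hh.symm)]
      have hnil : (wc.2.map (fun cf => ((pvLen wc, cf.1, wc.1), cf.2))).filter (fun x => x.1.1 == l && x.1.2.1 == c) = [] := by
        rw [List.filter_eq_nil_iff]
        intro x hx
        rcases List.mem_map.mp hx with ⟨cf, _, rfl⟩
        simp [h]
      rw [hnil]
      rfl

theorem pv_A_val (words : List (String × List (String × (Int × Int)))) (d : pvD1) (l : Int) (c w : String) :
    pvG3 (words.foldl pvAword d) l c w =
      (((pvStream words).filter (fun x => x.1 == (l, c, w))).map (fun x => x.2)).foldl pvUpd (pvG3 d l c w) := by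
  induction words generalizing d with
  | nil => rfl
  | cons wc rest ih =>
    simp only [List.foldl_cons]
    rw [ih, pv_stream_cons, List.filter_append, List.map_append, List.foldl_append]
    congr 1
    by_cases h : pvLen wc = l
    · subst h
      unfold pvG3 pvG2
      rw [pv_aw_g1_eq, pv_f2s_getD]
      by_cases hw : wc.1 = w
      · subst hw
        rw [pv_f3s_val_eq]
        congr 1
        rw [List.filter_map]
        simp only [List.map_map, Function.comp_def]
        congr 1
        apply List.filter_congr
        intro cf _
        rw [Bool.eq_iff_iff]
        simp [Prod.ext_iff]
      · rw [pv_f3s_val_ne _ _ _ (fun hh => hw hh.symm)]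
        have hnil : (wc.2.map (fun cf => ((pvLen wc, cf.1, wc.1), cf.2))).filter (fun x => x.1 == (pvLen wc, c, w)) = [] := by
          rw [List.filter_eq_nil_iff]
          intro x hx
          rcases List.mem_map.mp hx with ⟨cf, _, rfl⟩
          simp [Prod.ext_iff, hw]
        rw [hnil]
        rfl
    · unfold pvG3 pvG2
      rw [pv_aw_g1_ne d wc (fun hh => h hh.symm)]
      have hnil : (wc.2.map (fun cf => ((pvLen wc, cf.1, wc.1), cf.2))).filter (fun x => x.1 == (l, c, w)) = [] := by
        rw [List.filter_eq_nil_iff]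
        intro x hx
        rcases List.mem_map.mp hx with ⟨cf, _, rfl⟩
        simp [Prod.ext_iff, h]
      rw [hnil]
      rfl

-- ---- B side: pass 1 characterization ----
theorem pv_pass1_eq (words : List (String × List (String × (Int × Int))))
    (st : PySem.Set Int × PySem.Dict (Int × String × String) (List (Int × Int))) :
    words.foldl pvBpass1 st =
      (words.foldl (fun s wc => s.add (pvLen wc)) st.1,
       words.foldl (fun fl wc => wc.2.foldl (pvBflat wc.1 (pvLen wc)) fl) st.2) := by
  induction words generalizing st with
  | nil => rfl
  | cons wc rest ih =>
    simp only [List.foldl_cons]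
    rw [ih]
    rfl

theorem pv_flat_eq (words : List (String × List (String × (Int × Int))))
    (fl : PySem.Dict (Int × String × String) (List (Int × Int))) :
    words.foldl (fun fl wc => wc.2.foldl (pvBflat wc.1 (pvLen wc)) fl) fl =
      (pvStream words).foldl (fun fl x => fl.modify x.1 [] (fun xs => xs ++ [x.2])) fl := by
  induction words generalizing fl with
  | nil => rfl
  | cons wc rest ih =>
    simp only [List.foldl_cons]
    rw [ih, pv_stream_cons, List.foldl_append]
    congr 1
    rw [List.foldl_map]
    rfl

theorem pv_flat_items (words : List (String × List (String × (Int × Int)))) :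
    (pvFlat words).items = (pvTriples words).map (fun t => (t, pvFreqs words t)) := by
  have hk : (pvFlat words).keys = pvTriples words := by
    unfold pvFlat pvTriples
    rw [PySem.Dict.keys_foldl_modify_key (pvStream words) (fun x => x.1) [] (fun _ x => fun xs => xs ++ [x.2]) PySem.Dict.empty]
    rfl
  have hn : (pvFlat words).keys.Nodup := by
    rw [hk]
    exact PySem.Set.nodup_ofList _
  rw [PySem.Dict.items_eq_map_keys (pvFlat words) hn [], hk]
  apply List.map_congr_left
  intro t ht
  have hg : (pvFlat words).getD t [] = pvFreqs words t := by
    unfold pvFlat pvFreqs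
    rw [PySem.Dict.getD_foldl_modify_append (pvStream words) PySem.Dict.empty t]
    rfl
  rw [hg]

-- ---- B side: seed ----
theorem pv_seed_items (words : List (String × List (String × (Int × Int)))) :
    (pvSeed words).items = (PySem.Set.ofList (words.map pvLen)).map (fun l => (l, (PySem.Dict.empty : pvD2))) := by
  unfold pvSeed
  rw [PySem.Dict.items_foldl_insert_fresh (PySem.Set.ofList (words.map pvLen)) (fun l => l)
    (fun _ => PySem.Dict.empty) PySem.Dict.empty (fun _ _ => PySem.Dict.contains_empty _)
    (by simpa using PySem.Set.nodup_ofList (words.map pvLen))]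
  rfl

theorem pv_seed_keys (words : List (String × List (String × (Int × Int)))) :
    (pvSeed words).keys = PySem.Set.ofList (words.map pvLen) := by
  show (pvSeed words).items.map (fun p => p.1) = _
  rw [pv_seed_items]
  simp [Function.comp_def]

theorem pv_seed_g1 (words : List (String × List (String × (Int × Int)))) (l : Int) :
    pvG1 (pvSeed words) l = PySem.Dict.empty := by
  have hn : (pvSeed words).keys.Nodup := by
    rw [pv_seed_keys]
    exact PySem.Set.nodup_ofList _
  by_cases hm : l ∈ PySem.Set.ofList (words.map pvLen)
  · have hmem : (l, (PySem.Dict.empty : pvD2)) ∈ (pvSeed words).items := by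
      rw [pv_seed_items]
      exact List.mem_map_of_mem hm
    exact PySem.Dict.getD_of_mem_items _ hmem hn _
  · have hc : (pvSeed words).contains l = false := by
      rw [PySem.Dict.contains_eq_decide_mem_keys, pv_seed_keys]
      simpa using hm
    exact PySem.Dict.getD_of_not_contains _ _ hc

-- ---- B side: fill fold characterizations ----
theorem pv_bfill_keys (d : pvD1) (tf : (Int × String × String) × List (Int × Int)) :
    (pvBfill d tf).keys = PySem.Set.add d.keys tf.1.1 := by
  simp only [pvBfill]
  rw [pv_keys_modify_add]

theorem pv_B_keys (ps : List ((Int × String × String) × List (Int × Int))) (d : pvD1) :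
    (ps.foldl pvBfill d).keys = PySem.Set.update d.keys (ps.map (fun tf => tf.1.1)) := by
  induction ps generalizing d with
  | nil => rfl
  | cons tf ps ih =>
    simp only [List.foldl_cons, List.map_cons]
    rw [ih, pv_bfill_keys]
    rfl

theorem pv_B_g1 (ps : List ((Int × String × String) × List (Int × Int))) (d : pvD1) (l : Int) :
    pvG1 (ps.foldl pvBfill d) l =
      (ps.filter (fun tf => tf.1.1 == l)).foldl
        (fun d2 tf => d2.modify tf.1.2.1 PySem.Dict.empty (fun inner => inner.insert tf.1.2.2 (pvRed tf.2)))
        (pvG1 d l) := by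
  induction ps generalizing d with
  | nil => rfl
  | cons tf ps ih =>
    simp only [List.foldl_cons]
    by_cases h : tf.1.1 = l
    · subst h
      simp only [List.filter_cons, beq_self_eq_true, if_true, List.foldl_cons]
      rw [ih]
      congr 1
      unfold pvG1
      simp only [pvBfill]
      rw [PySem.Dict.getD_modify_self]
      rfl
    · have hf : (tf.1.1 == l) = false := by simpa using h
      simp only [List.filter_cons, hf, Bool.false_eq_true, if_false]
      rw [ih]
      congr 1
      unfold pvG1
      simp only [pvBfill]
      rw [PySem.Dict.getD_modify_of_ne _ _ _ (fun hh => h hh.symm)]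

theorem pv_B2_keys (qs : List ((Int × String × String) × List (Int × Int))) (d2 : pvD2) :
    (qs.foldl (fun d2 tf => d2.modify tf.1.2.1 PySem.Dict.empty (fun inner => inner.insert tf.1.2.2 (pvRed tf.2))) d2).keys =
      PySem.Set.update d2.keys (qs.map (fun tf => tf.1.2.1)) := by
  induction qs generalizing d2 with
  | nil => rfl
  | cons tf qs ih =>
    simp only [List.foldl_cons, List.map_cons]
    rw [ih, pv_keys_modify_add]
    rfl

theorem pv_B2_getD (qs : List ((Int × String × String) × List (Int × Int))) (d2 : pvD2) (c : String) :
    ((qs.foldl (fun d2 tf => d2.modify tf.1.2.1 PySem.Dict.empty (fun inner => inner.insert tf.1.2.2 (pvRed tf.2))) d2)).getD c PySem.Dict.empty =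
      (qs.filter (fun tf => tf.1.2.1 == c)).foldl (fun d3 tf => d3.insert tf.1.2.2 (pvRed tf.2)) (d2.getD c PySem.Dict.empty) := by
  induction qs generalizing d2 with
  | nil => rfl
  | cons tf qs ih =>
    simp only [List.foldl_cons]
    by_cases h : tf.1.2.1 = c
    · subst h
      simp only [List.filter_cons, beq_self_eq_true, if_true, List.foldl_cons]
      rw [ih, PySem.Dict.getD_modify_self]
    · have hf : (tf.1.2.1 == c) = false := by simpa using h
      simp only [List.filter_cons, hf, Bool.false_eq_true, if_false]
      rw [ih, PySem.Dict.getD_modify_of_ne _ _ _ (fun hh => h hh.symm)]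

theorem pv_B3_keys (rs : List ((Int × String × String) × List (Int × Int))) (d3 : pvD3) :
    ((rs.foldl (fun d3 tf => d3.insert tf.1.2.2 (pvRed tf.2)) d3)).keys =
      PySem.Set.update d3.keys (rs.map (fun tf => tf.1.2.2)) := by
  induction rs generalizing d3 with
  | nil => rfl
  | cons tf rs ih =>
    simp only [List.foldl_cons, List.map_cons]
    rw [ih, pv_keys_insert_add]
    rfl

theorem pv_B3_val (rs : List ((Int × String × String) × List (Int × Int))) (d3 : pvD3) (w : String) :
    ((rs.foldl (fun d3 tf => d3.insert tf.1.2.2 (pvRed tf.2)) d3)).getD w (0, 0) =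
      (rs.filter (fun tf => tf.1.2.2 == w)).foldl (fun _ tf => pvRed tf.2) (d3.getD w (0, 0)) := by
  induction rs generalizing d3 with
  | nil => rfl
  | cons tf rs ih =>
    simp only [List.foldl_cons]
    by_cases h : tf.1.2.2 = w
    · subst h
      simp only [List.filter_cons, beq_self_eq_true, if_true, List.foldl_cons]
      rw [ih, PySem.Dict.getD_insert_self]
    · have hf : (tf.1.2.2 == w) = false := by simpa using h
      simp only [List.filter_cons, hf, Bool.false_eq_true, if_false]
      rw [ih, PySem.Dict.getD_insert_of_ne _ _ _ (fun hh => h hh.symm)]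

theorem pv_B_g2keys (ps : List ((Int × String × String) × List (Int × Int))) (d : pvD1) (l : Int) (c : String) :
    (pvG2 (ps.foldl pvBfill d) l c).keys =
      PySem.Set.update (pvG2 d l c).keys
        ((ps.filter (fun tf => tf.1.1 == l && tf.1.2.1 == c)).map (fun tf => tf.1.2.2)) := by
  unfold pvG2
  rw [pv_B_g1, pv_B2_getD, pv_B3_keys, List.filter_filter]
  congr 1
  congr 1
  apply List.filter_congr
  intro tf _
  rw [Bool.eq_iff_iff]
  simp only [Bool.and_eq_true, beq_iff_eq]
  tauto

theorem pv_B_val (ps : List ((Int × String × String) × List (Int × Int))) (d : pvD1) (l : Int) (c w : String) :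
    pvG3 (ps.foldl pvBfill d) l c w =
      (ps.filter (fun tf => tf.1 == (l, c, w))).foldl (fun v tf => pvRed tf.2) (pvG3 d l c w) := by
  unfold pvG3 pvG2
  rw [pv_B_g1, pv_B2_getD, pv_B3_val, List.filter_filter, List.filter_filter]
  congr 1
  apply List.filter_congr
  intro tf _
  rw [Bool.eq_iff_iff]
  simp only [Bool.and_eq_true, beq_iff_eq, Prod.ext_iff]
  tauto

-- ---- assembly ----
-- ---- canonical key lists and values ----
def pvK2 (words : List (String × List (String × (Int × Int)))) (l : Int) : List String :=
  PySem.Set.ofList (((pvStream words).filter (fun x => x.1.1 == l)).map (fun x => x.1.2.1))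
def pvK3 (words : List (String × List (String × (Int × Int)))) (l : Int) (c : String) : List String :=
  PySem.Set.ofList (((pvStream words).filter (fun x => x.1.1 == l && x.1.2.1 == c)).map (fun x => x.1.2.2))

theorem pv_KA (words : List (String × List (String × (Int × Int)))) :
    (pvAD words).keys = PySem.Set.ofList (words.map pvLen) := by
  unfold pvAD
  rw [pv_A_keys]
  rfl

theorem pv_stream_len_mem (words : List (String × List (String × (Int × Int))))
    {x : (Int × String × String) × (Int × Int)} (hx : x ∈ pvStream words) :
    x.1.1 ∈ words.map pvLen := by
  rcases List.mem_flatMap.mp hx with ⟨wc, hwc, hx2⟩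
  rcases List.mem_map.mp hx2 with ⟨cf, _, rfl⟩
  exact List.mem_map_of_mem hwc

theorem pv_KB (words : List (String × List (String × (Int × Int)))) :
    (pvBD words).keys = PySem.Set.ofList (words.map pvLen) := by
  unfold pvBD
  rw [pv_B_keys, pv_seed_keys]
  apply pv_set_update_of_subset
  intro y hy
  rcases List.mem_map.mp hy with ⟨tf, htf, rfl⟩
  rw [pv_flat_items] at htf
  rcases List.mem_map.mp htf with ⟨t, htr, rfl⟩
  have ht : t ∈ (pvStream words).map (fun x => x.1) := (PySem.Set.mem_ofList _ _).mp htr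
  rcases List.mem_map.mp ht with ⟨x, hxs, rfl⟩
  exact (PySem.Set.mem_ofList _ _).mpr (pv_stream_len_mem words hxs)

theorem pv_K2A (words : List (String × List (String × (Int × Int)))) (l : Int) :
    (pvG1 (pvAD words) l).keys = pvK2 words l := by
  unfold pvAD
  rw [pv_A_g2keys]
  unfold pvG1
  rw [PySem.Dict.getD_empty]
  rfl

theorem pv_K2B (words : List (String × List (String × (Int × Int)))) (l : Int) :
    (pvG1 (pvBD words) l).keys = pvK2 words l := by
  unfold pvBD
  rw [pv_B_g1, pv_B2_keys, pv_seed_g1]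
  show PySem.Set.ofList ((((pvFlat words).items.filter (fun tf => tf.1.1 == l))).map (fun tf => tf.1.2.1)) = _
  rw [pv_flat_items, List.filter_map, List.map_map]
  unfold pvTriples pvK2
  rw [pv_filter_ofList, pv_ofList_map, List.filter_map, List.map_map]
  simp [Function.comp_def]

theorem pv_K3A (words : List (String × List (String × (Int × Int)))) (l : Int) (c : String) :
    (pvG2 (pvAD words) l c).keys = pvK3 words l c := by
  unfold pvAD
  rw [pv_A_g3keys]
  unfold pvG2 pvG1
  rw [PySem.Dict.getD_empty, PySem.Dict.getD_empty]
  rfl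

theorem pv_K3B (words : List (String × List (String × (Int × Int)))) (l : Int) (c : String) :
    (pvG2 (pvBD words) l c).keys = pvK3 words l c := by
  unfold pvBD
  rw [pv_B_g2keys]
  have hseed : pvG2 (pvSeed words) l c = PySem.Dict.empty := by
    unfold pvG2
    rw [pv_seed_g1, PySem.Dict.getD_empty]
  rw [hseed]
  show PySem.Set.ofList ((((pvFlat words).items.filter (fun tf => tf.1.1 == l && tf.1.2.1 == c))).map (fun tf => tf.1.2.2)) = _
  rw [pv_flat_items, List.filter_map, List.map_map]
  unfold pvTriples pvK3
  rw [pv_filter_ofList, pv_ofList_map, List.filter_map, List.map_map]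
  simp [Function.comp_def]

theorem pv_VA (words : List (String × List (String × (Int × Int)))) (l : Int) (c w : String) :
    pvG3 (pvAD words) l c w = (pvFreqs words (l, c, w)).foldl pvUpd (0, 0) := by
  unfold pvAD
  rw [pv_A_val]
  have h0 : pvG3 (PySem.Dict.empty : pvD1) l c w = (0, 0) := by
    unfold pvG3 pvG2 pvG1
    rw [PySem.Dict.getD_empty, PySem.Dict.getD_empty, PySem.Dict.getD_empty]
  rw [h0]
  rfl

theorem pv_VB (words : List (String × List (String × (Int × Int)))) (l : Int) (c w : String)
    (ht : (l, c, w) ∈ pvTriples words) :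
    pvG3 (pvBD words) l c w = (pvFreqs words (l, c, w)).foldl pvUpd (0, 0) := by
  unfold pvBD
  rw [pv_B_val]
  have hseed : pvG3 (pvSeed words) l c w = (0, 0) := by
    unfold pvG3 pvG2
    rw [pv_seed_g1, PySem.Dict.getD_empty, PySem.Dict.getD_empty]
  rw [hseed, pv_flat_items, List.filter_map]
  have hp : (pvTriples words).filter ((fun tf => tf.1 == (l, c, w)) ∘ (fun t => (t, pvFreqs words t))) =
      (pvTriples words).filter (fun t => t == (l, c, w)) := by
    apply List.filter_congr
    intro t _
    rfl
  rw [hp, pv_filter_eq_singleton (by unfold pvTriples; exact PySem.Set.nodup_ofList _) ht]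
  simp only [List.map_cons, List.map_nil, List.foldl_cons, List.foldl_nil]
  exact pv_red_eq _

theorem pv_K3_mem_triples (words : List (String × List (String × (Int × Int)))) (l : Int) (c w : String)
    (hw : w ∈ pvK3 words l c) : (l, c, w) ∈ pvTriples words := by
  unfold pvK3 at hw
  have hw' := (PySem.Set.mem_ofList _ _).mp hw
  rcases List.mem_map.mp hw' with ⟨x, hxf, rfl⟩
  rcases List.mem_filter.mp hxf with ⟨hxs, hpred⟩
  have h1 : x.1.1 = l ∧ x.1.2.1 = c := by
    rcases Bool.and_eq_true .. |>.mp hpred with ⟨ha, hb⟩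
    exact ⟨beq_iff_eq.mp ha, beq_iff_eq.mp hb⟩
  have hx1 : x.1 = (l, c, x.1.2.2) := by
    rcases h1 with ⟨ha, hb⟩
    exact Prod.ext ha (Prod.ext hb rfl)
  unfold pvTriples
  rw [PySem.Set.mem_ofList, ← hx1]
  exact List.mem_map_of_mem hxs

theorem pv_main (words : List (String × List (String × (Int × Int)))) : pvAD words = pvBD words := by
  have hnA : (pvAD words).keys.Nodup := by rw [pv_KA]; exact PySem.Set.nodup_ofList _
  have hnB : (pvBD words).keys.Nodup := by rw [pv_KB]; exact PySem.Set.nodup_ofList _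
  apply PySem.Dict.ext
  rw [PySem.Dict.items_eq_map_keys _ hnA PySem.Dict.empty,
      PySem.Dict.items_eq_map_keys _ hnB PySem.Dict.empty, pv_KA, pv_KB]
  apply List.map_congr_left
  intro l _
  have h1 : pvG1 (pvAD words) l = pvG1 (pvBD words) l := by
    have hn2A : (pvG1 (pvAD words) l).keys.Nodup := by
      rw [pv_K2A]; exact PySem.Set.nodup_ofList _
    have hn2B : (pvG1 (pvBD words) l).keys.Nodup := by
      rw [pv_K2B]; exact PySem.Set.nodup_ofList _
    apply PySem.Dict.ext
    rw [PySem.Dict.items_eq_map_keys _ hn2A PySem.Dict.empty,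
        PySem.Dict.items_eq_map_keys _ hn2B PySem.Dict.empty, pv_K2A, pv_K2B]
    apply List.map_congr_left
    intro c _
    have h2 : pvG2 (pvAD words) l c = pvG2 (pvBD words) l c := by
      have hn3A : (pvG2 (pvAD words) l c).keys.Nodup := by
        rw [pv_K3A]; exact PySem.Set.nodup_ofList _
      have hn3B : (pvG2 (pvBD words) l c).keys.Nodup := by
        rw [pv_K3B]; exact PySem.Set.nodup_ofList _
      apply PySem.Dict.ext
      rw [PySem.Dict.items_eq_map_keys _ hn3A ((0 : Int), (0 : Int)),
          PySem.Dict.items_eq_map_keys _ hn3B ((0 : Int), (0 : Int)), pv_K3A, pv_K3B]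
      apply List.map_congr_left
      intro w hw
      have h3 : pvG3 (pvAD words) l c w = pvG3 (pvBD words) l c w := by
        rw [pv_VA, pv_VB words l c w (pv_K3_mem_triples words l c w hw)]
      exact congrArg (Prod.mk w) h3
    exact congrArg (Prod.mk c) h2
  exact congrArg (Prod.mk l) h1

theorem pv_a_eq (words : List (String × List (String × (Int × Int)))) :
    sort_by_length_and_code words = pvToItems (pvAD words) := rfl

theorem pv_b_eq (words : List (String × List (String × (Int × Int)))) :
    sort_by_length_and_code_alt words = pvToItems (pvBD words) := by
  show pvToItems ((words.foldl pvBpass1 (PySem.Set.empty, PySem.Dict.empty)).2.items.foldl pvBfill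
      ((words.foldl pvBpass1 (PySem.Set.empty, PySem.Dict.empty)).1.foldl
        (fun d length => d.insert length (PySem.Dict.empty : pvD2)) PySem.Dict.empty)) = _
  rw [pv_pass1_eq]
  have hl : words.foldl (fun s wc => PySem.Set.add s (pvLen wc)) PySem.Set.empty = PySem.Set.ofList (words.map pvLen) := by
    show _ = (words.map pvLen).foldl PySem.Set.add PySem.Set.empty
    rw [List.foldl_map]
  rw [hl, pv_flat_eq words PySem.Dict.empty]
  rfl

-- ===== VERDICT (by name: the statement is the Claim_ definition above) =====
theorem sort_by_length_and_code_spec : Claim_equal_sort_by_length_and_code := by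
  intro words _
  unfold Spec_sort_by_length_and_code
  rw [pv_a_eq, pv_b_eq, pv_main]
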